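-- pv_equiv track=rewrite | github.com/arghomitra/Python | license_plate.py | forbidden
-- ===== SOURCE A (Python) =====
-- def forbidden(plate):
--
--     forbidden_combination = ['AAP', 'AAS', 'AEL', 'ALA', 'ANE', 'ASS', 'BEB', 'BIT', 'BOM', 'BOY', 'BSP', 'BUB', 'BWP',
--                              'BYT', 'CAP', 'CDF', 'CDH', 'CDV', 'CON', 'CSP', 'CUB', 'CUL', 'CUT', 'CVP', 'DCD', 'DIK',
--                              'DOM', 'FDF', 'FOK', 'FOL', 'FOU', 'FUC', 'FUK', 'GAT', 'GAY', 'GEK', 'GOD', 'HIV', 'HOL',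
--                              'JEK', 'KAK', 'KKQ', 'KUL', 'KUT', 'LAF', 'LDD', 'LSP', 'LUL',
--                              'MAS', 'MCC', 'MDP', 'MOR', 'MOU', 'MST', 'NIC', 'NIK', 'NIQ', 'NVA', 'PDB', 'PDO', 'PET',
--                              'PFF', 'PIK', 'PIN', 'PIP', 'PIS', 'PJU', 'PKK', 'POT', 'PRL', 'PSB', 'PSC', 'PSL', 'PTB',
--                              'PUE', 'PUT', 'PVV', 'PYK', 'PYN', 'PYP', 'PYS', 'ROM', 'SEX', 'SOA', 'SOT', 'SPA', 'SUL',
--                              'TAK', 'TET', 'TIT', 'TUE', 'VCD', 'VIH', 'VLD', 'VMO', 'VNV', 'ZAC', 'ZAK', 'ZOT']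
--
--     for word in forbidden_combination:
--         if word in plate:
--             return True
--     return False
-- ===== SOURCE B (Python) =====
-- _WORDS = ("AAPAASAELALAANEASSBEBBITBOMBOYBSPBUBBWPBYTCAPCDFCDHCDVCONCSPCUBCULCUTCVPDCDDIK"
--           "DOMFDFFOKFOLFOUFUCFUKGATGAYGEKGODHIVHOLJEKKAKKKQKULKUTLAFLDDLSPLULMASMCCMDPMORMOUMST"
--           "NICNIKNIQNVAPDBPDOPETPFFPIKPINPIPPISPJUPKKPOTPRLPSBPSCPSLPTBPUEPUTPVVPYKPYNPYPPYS"
--           "ROMSEXSOASOTSPASULTAKTETTITTUEVCDVIHVLDVMOVNVZACZAKZOT")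
-- _FORBIDDEN = frozenset(_WORDS[i:i + 3] for i in range(0, len(_WORDS), 3))
--
--
-- def forbidden(plate):
--     return any(plate[i:i + 3] in _FORBIDDEN for i in range(len(plate) - 2))
-- ===== Notes on version B (the rewrite author's own statement) =====
-- stated objective: idiomatic
-- what changed: Instead of looping over the 99 forbidden words and substring-scanning the plate for each, B makes one pass over the plate's 3-character windows and tests each for membership in a frozenset (built once from a packed constant string in 3-character chunks).
import Mathlib
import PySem

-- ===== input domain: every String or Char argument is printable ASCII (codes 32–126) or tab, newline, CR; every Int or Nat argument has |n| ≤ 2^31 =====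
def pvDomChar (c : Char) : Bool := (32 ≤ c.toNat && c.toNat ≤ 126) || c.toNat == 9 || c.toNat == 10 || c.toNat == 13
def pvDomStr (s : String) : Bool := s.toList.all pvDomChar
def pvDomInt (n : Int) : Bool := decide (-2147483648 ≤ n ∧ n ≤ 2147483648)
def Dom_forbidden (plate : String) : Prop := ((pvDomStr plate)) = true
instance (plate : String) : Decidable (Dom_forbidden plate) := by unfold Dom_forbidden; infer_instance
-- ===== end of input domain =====

-- B replaces A's scan over the 99 forbidden words (a substring search each) by one pass over the
-- plate's 3-character windows, each tested for membership in a set built from a packed constant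
-- string in 3-character chunks; objective: idiomatic.

-- ===== PORT A =====
def forbiddenWords : List String := ["AAP", "AAS", "AEL", "ALA", "ANE", "ASS", "BEB", "BIT", "BOM", "BOY", "BSP", "BUB", "BWP", "BYT", "CAP", "CDF", "CDH", "CDV", "CON", "CSP", "CUB", "CUL", "CUT", "CVP", "DCD", "DIK", "DOM", "FDF", "FOK", "FOL", "FOU", "FUC", "FUK", "GAT", "GAY", "GEK", "GOD", "HIV", "HOL", "JEK", "KAK", "KKQ", "KUL", "KUT", "LAF", "LDD", "LSP", "LUL", "MAS", "MCC", "MDP", "MOR", "MOU", "MST", "NIC", "NIK", "NIQ", "NVA", "PDB", "PDO", "PET", "PFF", "PIK", "PIN", "PIP", "PIS", "PJU", "PKK", "POT", "PRL", "PSB", "PSC", "PSL", "PTB", "PUE", "PUT", "PVV", "PYK", "PYN", "PYP", "PYS", "ROM", "SEX", "SOA", "SOT", "SPA", "SUL", "TAK", "TET", "TIT", "TUE", "VCD", "VIH", "VLD", "VMO", "VNV", "ZAC", "ZAK", "ZOT"]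

-- 'for word in forbidden_combination: if word in plate: return True / return False'
def forbiddenLoop (plate : String) : List String → Bool
  | [] => false
  | w :: ws => if PySem.Str.isIn w plate then true else forbiddenLoop plate ws

def forbidden (plate : String) : Bool := forbiddenLoop plate forbiddenWords

-- ===== PORT B =====
-- _WORDS: the packed constant string of Source B
def forbiddenPacked : String := "AAPAASAELALAANEASSBEBBITBOMBOYBSPBUBBWPBYTCAPCDFCDHCDVCONCSPCUBCULCUTCVPDCDDIKDOMFDFFOKFOLFOUFUCFUKGATGAYGEKGODHIVHOLJEKKAKKKQKULKUTLAFLDDLSPLULMASMCCMDPMORMOUMSTNICNIKNIQNVAPDBPDOPETPFFPIKPINPIPPISPJUPKKPOTPRLPSBPSCPSLPTBPUEPUTPVVPYKPYNPYPPYSROMSEXSOASOTSPASULTAKTETTITTUEVCDVIHVLDVMOVNVZACZAKZOT"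

-- frozenset(_WORDS[i:i+3] for i in range(0, len(_WORDS), 3))
def forbiddenSet : PySem.Set String :=
  PySem.Set.ofList ((PySem.List.pyRange 0 (PySem.Str.len forbiddenPacked) 3).map
    (fun i => PySem.Str.slice forbiddenPacked (some i) (some (i + 3))))

-- any(plate[i:i+3] in _FORBIDDEN for i in range(len(plate)-2))
def forbidden_alt (plate : String) : Bool :=
  (PySem.List.pyRange 0 (PySem.Str.len plate - 2) 1).any
    (fun i => PySem.Set.contains forbiddenSet (PySem.Str.slice plate (some i) (some (i + 3))))

-- ===== PRECONDITION & SPEC =====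
def Spec_forbidden (plate : String) (out : Bool) : Prop := out = forbidden_alt plate
instance (plate : String) (out : Bool) : Decidable (Spec_forbidden plate out) := by
  unfold Spec_forbidden; infer_instance

-- ===== CLAIM =====
def Claim_equal_forbidden : Prop := ∀ (plate : String), Dom_forbidden plate → Spec_forbidden plate (forbidden plate)

-- ===== LEMMAS AND PROOFS =====
lemma forbiddenLoop_eq_any (plate : String) (ws : List String) :
    forbiddenLoop plate ws = ws.any (fun w => PySem.Str.isIn w plate) := by
  induction ws with
  | nil => rfl
  | cons w ws ih => by_cases h : PySem.Str.isIn w plate <;> simp [forbiddenLoop, ih]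

-- the packed-string chunks are exactly A's word list (checked by evaluation)
lemma chunks_eq_words :
    ((PySem.List.pyRange 0 (PySem.Str.len forbiddenPacked) 3).map
      (fun i => PySem.Str.slice forbiddenPacked (some i) (some (i + 3)))) = forbiddenWords := by
  set_option maxRecDepth 8192 in decide

lemma mem_forbiddenSet (w : String) : w ∈ forbiddenSet ↔ w ∈ forbiddenWords := by
  rw [show forbiddenSet = PySem.Set.ofList forbiddenWords from by
    rw [forbiddenSet, chunks_eq_words]]
  simp [PySem.Set.mem_ofList]

lemma words_len3 : ∀ w ∈ forbiddenWords, w.toList.length = 3 := by decide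

-- 'word in plate' for a 3-letter word holds iff some in-range 3-character slice equals the word
lemma isIn_iff_exists_slice (plate w : String) (hw : w.toList.length = 3) :
    PySem.Str.isIn w plate = true ↔
      ∃ i ∈ PySem.List.pyRange 0 (PySem.Str.len plate - 2) 1,
        PySem.Str.slice plate (some i) (some (i + 3)) = w := by
  rw [show PySem.Str.isIn w plate = PySem.Chars.isIn w.toList plate.toList from rfl,
    ← PySem.Chars.exists_prefix_drop_iff_isIn]
  constructor
  · rintro ⟨j, hj⟩
    have hlen : w.toList.length ≤ (plate.toList.drop j).length := hj.length_le
    simp only [List.length_drop, hw] at hlen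
    refine ⟨(j : Int), ?_, ?_⟩
    · rw [PySem.List.mem_pyRange_one]
      constructor
      · exact_mod_cast Int.natCast_nonneg j
      · have : (PySem.Str.len plate) = (plate.toList.length : Int) := rfl
        omega
    · rw [← String.toList_inj]
      simp only [PySem.Str.slice, String.toList_ofList,
        show ∀ (s : List Char) (a b : Int), PySem.Chars.slice s (some a) (some b)
           = PySem.List.slice s (some a) (some b) from fun _ _ _ => rfl]
      rw [PySem.List.slice_toNat _ (by positivity) (by positivity)]
      have h1 : ((j:Int) + 3).toNat = j + 3 := by omega
      have h2 : ((j:Int)).toNat = j := by omega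
      rw [h1, h2]
      have := (List.prefix_iff_eq_take.mp hj)
      rw [hw] at this
      simpa [Nat.add_sub_cancel_left] using this.symm
  · rintro ⟨i, hi, hs⟩
    rw [PySem.List.mem_pyRange_one] at hi
    obtain ⟨h0, hlt⟩ := hi
    refine ⟨i.toNat, ?_⟩
    rw [← String.toList_inj] at hs
    simp only [PySem.Str.slice, String.toList_ofList,
      show ∀ (s : List Char) (a b : Int), PySem.Chars.slice s (some a) (some b)
         = PySem.List.slice s (some a) (some b) from fun _ _ _ => rfl] at hs
    rw [PySem.List.slice_toNat _ h0 (by omega)] at hs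
    have h3 : (i + 3).toNat - i.toNat = 3 := by omega
    rw [h3] at hs
    rw [List.prefix_iff_eq_take, hw, hs]

-- ===== VERDICT =====
theorem forbidden_spec : Claim_equal_forbidden := by
  intro plate _
  unfold Spec_forbidden forbidden forbidden_alt
  rw [forbiddenLoop_eq_any, Bool.eq_iff_iff]
  simp only [List.any_eq_true, PySem.Set.contains_iff, mem_forbiddenSet]
  constructor
  · rintro ⟨w, hw, hin⟩
    obtain ⟨i, hi, hs⟩ := (isIn_iff_exists_slice plate w (words_len3 w hw)).mp hin
    exact ⟨i, hi, hs ▸ hw⟩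
  · rintro ⟨i, hi, hmem⟩
    refine ⟨_, hmem, ?_⟩
    rw [isIn_iff_exists_slice plate _ (words_len3 _ hmem)]
    exact ⟨i, hi, rfl⟩
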